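-- pv_equiv track=rewrite | github.com/kengerlwl/leeCode | 比赛/1540. K 次操作转变字符串.py | canConvertString
-- ===== SOURCE A (Python) =====
-- def canConvertString(s, t, k):
--     """
--     :type s: str
--     :type t: str
--     :type k: int
--     :rtype: bool
--     """
--     length = len(s)
--
--     if len(s) !=  len(t):
--         return False
--
--     val ={}
--     for i in range(length):
--         dif =  ord(t[i]) - ord(s[i])
--         if dif == 0:
--             continue
--         if dif <0:
--             dif += 26
--         if dif > k:
--             return False
--         else:
--             if dif not in val:
--                 val[dif] = dif
--             else:
--                 cur = val[dif]
--                 cur +=  26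
--                 if cur > k:
--                     return False
--                 else:
--                     val[dif] = cur
--
--     return True
-- ===== SOURCE B (Python) =====
-- def canConvertString(s, t, k):
--     if len(s) != len(t):
--         return False
--     shifts = []
--     for a, b in zip(s, t):
--         d = ord(b) - ord(a)
--         if d != 0:
--             shifts.append(d + 26 if d < 0 else d)
--     shifts.sort()
--     prev = None
--     run = 0
--     for v in shifts:
--         run = run + 1 if v == prev else 1
--         prev = v
--         if v + 26 * (run - 1) > k:
--             return False
--     return True
-- ===== Notes on version B (the rewrite author's own statement) =====
-- stated objective: alternative
-- what changed: A maintains a dict of running per-shift costs, incrementing by 26 on each repeat with early returns; B uses no dict at all: it collects the normalized shift differences, sorts them, and checks each element against k in a single run-length scan over the sorted list (equal shifts are adjacent, so the run index gives the occurrence number).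
import Mathlib
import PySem

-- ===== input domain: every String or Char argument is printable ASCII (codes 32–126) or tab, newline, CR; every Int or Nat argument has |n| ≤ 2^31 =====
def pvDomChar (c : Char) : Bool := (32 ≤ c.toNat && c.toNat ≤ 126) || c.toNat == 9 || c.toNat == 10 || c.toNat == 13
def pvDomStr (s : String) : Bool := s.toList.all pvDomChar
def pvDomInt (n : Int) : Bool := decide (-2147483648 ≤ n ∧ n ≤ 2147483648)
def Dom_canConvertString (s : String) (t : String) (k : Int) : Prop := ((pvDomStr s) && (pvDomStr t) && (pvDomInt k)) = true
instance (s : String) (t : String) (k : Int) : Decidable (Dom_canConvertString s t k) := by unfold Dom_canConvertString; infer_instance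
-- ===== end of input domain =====

-- B replaces A's dict of running per-shift costs by a dict-free sort-then-scan: collect the
-- normalized shifts, sort them, and check each element in a run-length scan over the sorted list.

-- ===== PORT A =====
-- 'if dif < 0: dif += 26' of A
def normShift (dif : Int) : Int := if dif < 0 then dif + 26 else dif

-- A's loop 'for i in range(length)' reads s[i] and t[i]; after the length guard this walks the
-- two character lists in parallel, ported as structural recursion carrying A's dict 'val'.
def canConvertLoop (ss ts : List Char) (val : PySem.Dict Int Int) (k : Int) : Bool :=
  match ss, ts with
  | a :: ss', b :: ts' =>
    if (b.toNat : Int) - (a.toNat : Int) = 0 then canConvertLoop ss' ts' val k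
    else if normShift ((b.toNat : Int) - (a.toNat : Int)) > k then false
    else if !val.contains (normShift ((b.toNat : Int) - (a.toNat : Int))) then
      canConvertLoop ss' ts'
        (val.insert (normShift ((b.toNat : Int) - (a.toNat : Int)))
                    (normShift ((b.toNat : Int) - (a.toNat : Int)))) k
    else if val.getD (normShift ((b.toNat : Int) - (a.toNat : Int))) 0 + 26 > k then false
    else canConvertLoop ss' ts'
        (val.insert (normShift ((b.toNat : Int) - (a.toNat : Int)))
                    (val.getD (normShift ((b.toNat : Int) - (a.toNat : Int))) 0 + 26)) k
  | _, _ => true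

def canConvertString (s : String) (t : String) (k : Int) : Bool :=
  if PySem.Str.len s ≠ PySem.Str.len t then false
  else canConvertLoop s.toList t.toList PySem.Dict.empty k

-- ===== PORT B =====
-- B's first loop: 'for a, b in zip(s, t): d = ord(b) - ord(a); if d != 0: shifts.append(d + 26 if d < 0 else d)'
def buildShifts (ps : List (Char × Char)) : List Int :=
  ps.foldl (fun acc p =>
    if ((p.2.toNat : Int) - (p.1.toNat : Int)) ≠ 0 then
      acc ++ [if ((p.2.toNat : Int) - (p.1.toNat : Int)) < 0
              then (p.2.toNat : Int) - (p.1.toNat : Int) + 26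
              else (p.2.toNat : Int) - (p.1.toNat : Int)]
    else acc) []

-- B's second loop: run-length scan of the sorted shifts carrying (prev, run)
def scanShifts (k : Int) : List Int → Option Int → Int → Bool
  | [], _, _ => true
  | v :: rest, prev, run =>
      let run' := if prev = some v then run + 1 else 1
      if v + 26 * (run' - 1) > k then false
      else scanShifts k rest (some v) run'

def canConvertString_alt (s : String) (t : String) (k : Int) : Bool :=
  if PySem.Str.len s ≠ PySem.Str.len t then false
  else scanShifts k
    (PySem.List.sorted (buildShifts (s.toList.zip t.toList)) (fun x => x) false) none 0

-- ===== PRECONDITION & SPEC =====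
def Spec_canConvertString (s : String) (t : String) (k : Int) (out : Bool) : Prop := out = canConvertString_alt s t k
instance (s : String) (t : String) (k : Int) (out : Bool) : Decidable (Spec_canConvertString s t k out) := by unfold Spec_canConvertString; infer_instance

-- ===== CLAIM (what is proved, stated in full; the proofs are below) =====
def Claim_equal_canConvertString : Prop := ∀ (s : String) (t : String) (k : Int), Dom_canConvertString s t k → Spec_canConvertString s t k (canConvertString s t k)

-- ===== LEMMAS AND PROOFS =====

lemma char_eq_of_toNat_eq {a b : Char} (h : a.toNat = b.toNat) : a = b := by
  have h2 := congrArg Char.ofNat h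
  rwa [Char.ofNat_toNat, Char.ofNat_toNat] at h2

-- normalized shift of one unequal pair (proof-side abbreviation shared by both analyses)
def shiftOf (p : Char × Char) : Int :=
  if (p.2.toNat : Int) ≥ (p.1.toNat : Int) then (p.2.toNat : Int) - (p.1.toNat : Int)
  else (p.2.toNat : Int) - (p.1.toNat : Int) + 26

-- the normalized nonzero shift differences of the remaining positions
def nds (ss ts : List Char) : List Int :=
  ((ss.zip ts).filter (fun p => p.1 != p.2)).map shiftOf

lemma normShift_eq_shiftOf (a b : Char) :
    normShift ((b.toNat : Int) - (a.toNat : Int)) = shiftOf (a, b) := by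
  simp only [normShift, shiftOf]
  split_ifs <;> omega

lemma canConvertLoop_eq (ss : List Char) (ts : List Char) (k : Int)
    (val : PySem.Dict Int Int) (seen : List Int)
    (hval : ∀ d, val.get? d = if seen.count d = 0 then none
                              else some (d + 26 * ((seen.count d : Int) - 1)))
    (hseen : ∀ d ∈ seen, d + 26 * ((seen.count d : Int) - 1) ≤ k) :
    canConvertLoop ss ts val k =
      decide (∀ d ∈ seen ++ nds ss ts,
        d + 26 * (((seen ++ nds ss ts).count d : Int) - 1) ≤ k) := by
  induction ss generalizing ts val seen with
  | nil =>
    have hn : nds ([] : List Char) ts = [] := by simp [nds]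
    rw [hn, List.append_nil]
    have h1 : canConvertLoop [] ts val k = true := by cases ts <;> rfl
    rw [h1]
    exact (decide_eq_true hseen).symm
  | cons a ss' ih =>
    cases ts with
    | nil =>
      have hn : nds (a :: ss') [] = [] := by simp [nds]
      rw [hn, List.append_nil]
      have h1 : canConvertLoop (a :: ss') [] val k = true := rfl
      rw [h1]
      exact (decide_eq_true hseen).symm
    | cons b ts' =>
      by_cases h0 : (b.toNat : Int) - (a.toNat : Int) = 0
      · have hab : a = b := char_eq_of_toNat_eq (by omega)
        subst hab
        have hnds : nds (a :: ss') (a :: ts') = nds ss' ts' := by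
          simp [nds]
        have hloop : canConvertLoop (a :: ss') (a :: ts') val k = canConvertLoop ss' ts' val k := by
          simp only [canConvertLoop]
          rw [if_pos h0]
        rw [hloop, hnds]
        exact ih ts' val seen hval hseen
      · have hab : a ≠ b := by
          intro h; subst h; omega
        have hnds : nds (a :: ss') (b :: ts') = shiftOf (a, b) :: nds ss' ts' := by
          simp [nds, hab]
        have hloop : canConvertLoop (a :: ss') (b :: ts') val k =
            (if shiftOf (a, b) > k then false
             else if !val.contains (shiftOf (a, b)) then
               canConvertLoop ss' ts' (val.insert (shiftOf (a, b)) (shiftOf (a, b))) k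
             else if val.getD (shiftOf (a, b)) 0 + 26 > k then false
             else canConvertLoop ss' ts'
               (val.insert (shiftOf (a, b)) (val.getD (shiftOf (a, b)) 0 + 26)) k) := by
          simp only [canConvertLoop]
          rw [if_neg h0, normShift_eq_shiftOf]
        rw [hloop, hnds]
        by_cases hk : shiftOf (a, b) > k
        · rw [if_pos hk]
          symm
          rw [decide_eq_false_iff_not]
          intro hall
          have hmem : shiftOf (a, b) ∈ seen ++ shiftOf (a, b) :: nds ss' ts' := by simp
          have hb := hall _ hmem
          have hc : 0 < (seen ++ shiftOf (a, b) :: nds ss' ts').count (shiftOf (a, b)) :=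
            List.count_pos_iff.mpr hmem
          omega
        · rw [if_neg hk]
          by_cases hcont : val.contains (shiftOf (a, b)) = true
          · rw [if_neg (by simp [hcont])]
            have hc0 : seen.count (shiftOf (a, b)) ≠ 0 := by
              intro h
              have hg := hval (shiftOf (a, b))
              rw [if_pos h] at hg
              rw [PySem.Dict.contains_eq_isSome_get?, hg] at hcont
              simp at hcont
            have hget : val.get? (shiftOf (a, b)) =
                some (shiftOf (a, b) + 26 * ((seen.count (shiftOf (a, b)) : Int) - 1)) := by
              rw [hval (shiftOf (a, b)), if_neg hc0]
            have hgetD : val.getD (shiftOf (a, b)) 0 =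
                shiftOf (a, b) + 26 * ((seen.count (shiftOf (a, b)) : Int) - 1) :=
              PySem.Dict.getD_of_get?_eq_some val 0 hget
            by_cases hcur : val.getD (shiftOf (a, b)) 0 + 26 > k
            · rw [if_pos hcur]
              symm
              rw [decide_eq_false_iff_not]
              intro hall
              have hmem : shiftOf (a, b) ∈ seen ++ shiftOf (a, b) :: nds ss' ts' := by simp
              have hb := hall _ hmem
              have hcnt : (seen ++ shiftOf (a, b) :: nds ss' ts').count (shiftOf (a, b)) =
                  seen.count (shiftOf (a, b)) + ((nds ss' ts').count (shiftOf (a, b)) + 1) := by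
                simp [List.count_append]
              rw [hgetD] at hcur
              omega
            · rw [if_neg hcur, List.append_cons]
              apply ih
              · intro x
                rw [PySem.Dict.get?_insert]
                by_cases hx : x = shiftOf (a, b)
                · rw [if_pos hx, hx]
                  have hcnt : (seen ++ [shiftOf (a, b)]).count (shiftOf (a, b))
                      = seen.count (shiftOf (a, b)) + 1 := by
                    simp [List.count_append]
                  rw [hcnt, if_neg (by omega)]
                  rw [hgetD]
                  congr 1
                  push_cast
                  ring
                · have hx' : ¬ shiftOf (a, b) = x := fun h => hx h.symm
                  rw [if_neg hx]
                  have hcnt : (seen ++ [shiftOf (a, b)]).count x = seen.count x := by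
                    simp [List.count_append, hx']
                  rw [hcnt, hval x]
              · intro x hx
                by_cases hxd : x = shiftOf (a, b)
                · rw [hxd]
                  have hcnt : (seen ++ [shiftOf (a, b)]).count (shiftOf (a, b))
                      = seen.count (shiftOf (a, b)) + 1 := by
                    simp [List.count_append]
                  rw [hcnt]
                  rw [hgetD] at hcur
                  push_cast
                  omega
                · have hxd' : ¬ shiftOf (a, b) = x := fun h => hxd h.symm
                  have hxs : x ∈ seen := by
                    rcases List.mem_append.mp hx with h | h
                    · exact h
                    · simp at h; exact absurd h hxd
                  have hcnt : (seen ++ [shiftOf (a, b)]).count x = seen.count x := by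
                    simp [List.count_append, hxd']
                  rw [hcnt]
                  exact hseen x hxs
          · rw [if_pos (by simp [Bool.not_eq_true] at hcont ⊢; exact hcont)]
            have hc0 : seen.count (shiftOf (a, b)) = 0 := by
              by_contra h
              have hg := hval (shiftOf (a, b))
              rw [if_neg h] at hg
              rw [PySem.Dict.contains_eq_isSome_get?, hg] at hcont
              simp at hcont
            rw [List.append_cons]
            apply ih
            · intro x
              rw [PySem.Dict.get?_insert]
              by_cases hx : x = shiftOf (a, b)
              · rw [if_pos hx, hx]
                have hcnt : (seen ++ [shiftOf (a, b)]).count (shiftOf (a, b)) = 1 := by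
                  simp [List.count_append, hc0]
                rw [hcnt, if_neg (by omega)]
                congr 1
                push_cast
                ring
              · have hx' : ¬ shiftOf (a, b) = x := fun h => hx h.symm
                rw [if_neg hx]
                have hcnt : (seen ++ [shiftOf (a, b)]).count x = seen.count x := by
                  simp [List.count_append, hx']
                rw [hcnt, hval x]
            · intro x hx
              by_cases hxd : x = shiftOf (a, b)
              · rw [hxd]
                have hcnt : (seen ++ [shiftOf (a, b)]).count (shiftOf (a, b)) = 1 := by
                  simp [List.count_append, hc0]
                rw [hcnt]
                push_cast
                omega
              · have hxd' : ¬ shiftOf (a, b) = x := fun h => hxd h.symm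
                have hxs : x ∈ seen := by
                  rcases List.mem_append.mp hx with h | h
                  · exact h
                  · simp at h; exact absurd h hxd
                have hcnt : (seen ++ [shiftOf (a, b)]).count x = seen.count x := by
                  simp [List.count_append, hxd']
                rw [hcnt]
                exact hseen x hxs

-- B's first loop builds exactly the list nds of normalized nonzero shifts
-- (bstep is definitionally the step function of buildShifts's foldl)
def bstep (acc : List Int) (p : Char × Char) : List Int :=
  if ((p.2.toNat : Int) - (p.1.toNat : Int)) ≠ 0 then
    acc ++ [if ((p.2.toNat : Int) - (p.1.toNat : Int)) < 0
            then (p.2.toNat : Int) - (p.1.toNat : Int) + 26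
            else (p.2.toNat : Int) - (p.1.toNat : Int)]
  else acc

lemma buildShifts_eq (ps : List (Char × Char)) (acc : List Int) :
    ps.foldl bstep acc = acc ++ (ps.filter (fun p => p.1 != p.2)).map shiftOf := by
  induction ps generalizing acc with
  | nil => simp
  | cons p ps' ih =>
    obtain ⟨a, b⟩ := p
    rw [List.foldl_cons]
    by_cases h0 : ((b.toNat : Int) - (a.toNat : Int)) = 0
    · have hab : a = b := char_eq_of_toNat_eq (by omega)
      subst hab
      have hstep : bstep acc (a, a) = acc := by simp [bstep]
      rw [hstep, ih]
      simp
    · have hab : a ≠ b := by intro h; subst h; omega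
      have hstep : bstep acc (a, b) = acc ++ [shiftOf (a, b)] := by
        simp only [bstep, shiftOf]
        rw [if_pos h0]
        split_ifs <;> first | rfl | omega
      rw [hstep, ih]
      simp [hab]

-- B's scan over a sorted list checks exactly the per-shift closed-form conditions
lemma scanShifts_eq (k : Int) (M : List Int) (prev : Option Int) (run : Int)
    (hs : M.Pairwise (· ≤ ·))
    (hge : ∀ x ∈ M, ∀ p, prev = some p → p ≤ x) :
    scanShifts k M prev run =
      decide (∀ v ∈ M, v + 26 * (((M.count v : Int) - 1) + (if prev = some v then run else 0)) ≤ k) := by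
  induction M generalizing prev run with
  | nil => simp [scanShifts]
  | cons v rest ih =>
    have hs1 : ∀ x ∈ rest, v ≤ x := by
      intro x hx; exact (List.pairwise_cons.mp hs).1 x hx
    have hs2 : rest.Pairwise (· ≤ ·) := (List.pairwise_cons.mp hs).2
    set r0 : Int := if prev = some v then run else 0 with hr0
    have hrun' : (if prev = some v then run + 1 else 1) = r0 + 1 := by
      rw [hr0]; split_ifs <;> ring
    -- tail elements other than v never match prev
    have hne : ∀ w ∈ rest, w ≠ v → prev ≠ some w := by
      intro w hw hwv hpw
      subst hpw
      have h1 : w ≤ v := hge v (by simp) w rfl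
      have h2 : v ≤ w := hs1 w hw
      exact hwv (le_antisymm h1 h2)
    have key : (∀ w ∈ v :: rest,
          w + 26 * ((((v :: rest).count w : Int) - 1) + (if prev = some w then run else 0)) ≤ k)
        ↔ (v + 26 * r0 ≤ k ∧
           ∀ w ∈ rest,
             w + 26 * (((rest.count w : Int) - 1) + (if (some v : Option Int) = some w then r0 + 1 else 0)) ≤ k) := by
      constructor
      · intro h
        have hv := h v (by simp)
        have hcv : (v :: rest).count v = rest.count v + 1 := by simp
        rw [hcv, ← hr0] at hv
        have hcnn : (0 : Int) ≤ (rest.count v : Int) := by positivity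
        refine ⟨by push_cast at hv ⊢; omega, ?_⟩
        intro w hw
        by_cases hwv : w = v
        · subst hwv
          rw [if_pos rfl]
          push_cast at hv ⊢
          omega
        · have hw2 := h w (by simp [hw])
          have hvw : ¬ v = w := fun h' => hwv h'.symm
          have hcw : (v :: rest).count w = rest.count w := by
            simp [hvw]
          rw [hcw, if_neg (hne w hw hwv)] at hw2
          rw [if_neg (fun h' => hvw (Option.some_inj.mp h'))]
          omega
      · rintro ⟨h1, h2⟩ w hw
        rcases List.mem_cons.mp hw with hwv | hw'
        · subst hwv
          have hcw : (w :: rest).count w = rest.count w + 1 := by simp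
          rw [hcw, ← hr0]
          by_cases hmem : w ∈ rest
          · have := h2 w hmem
            rw [if_pos rfl] at this
            push_cast at this ⊢
            omega
          · have hc0 : rest.count w = 0 := List.count_eq_zero.mpr hmem
            rw [hc0]
            push_cast
            omega
        · by_cases hwv : w = v
          · subst hwv
            have hcw : (w :: rest).count w = rest.count w + 1 := by simp
            rw [hcw, ← hr0]
            have := h2 w hw'
            rw [if_pos rfl] at this
            push_cast at this ⊢
            omega
          · have hvw : ¬ v = w := fun h' => hwv h'.symm
            have := h2 w hw'
            rw [if_neg (fun h' => hvw (Option.some_inj.mp h'))] at this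
            have hcw : (v :: rest).count w = rest.count w := by
              simp [hvw]
            rw [hcw, if_neg (hne w hw' hwv)]
            omega
    show (if v + 26 * ((if prev = some v then run + 1 else 1) - 1) > k then false
          else scanShifts k rest (some v) (if prev = some v then run + 1 else 1)) = _
    rw [hrun']
    have hsimp : v + 26 * (r0 + 1 - 1) = v + 26 * r0 := by ring_nf
    rw [hsimp]
    by_cases hk : v + 26 * r0 > k
    · rw [if_pos hk]
      symm
      rw [decide_eq_false_iff_not]
      intro hall
      have := (key.mp hall).1
      omega
    · rw [if_neg hk]
      rw [ih (some v) (r0 + 1) hs2 (fun x hx p hp => by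
        have hp' : p = v := (Option.some_inj.mp hp.symm)
        subst hp'; exact hs1 x hx)]
      apply decide_eq_decide.mpr
      constructor
      · intro h'
        exact key.mpr ⟨by omega, h'⟩
      · intro h'
        exact (key.mp h').2

-- ===== VERDICT (by name: the statement is the Claim_ definition above) =====
theorem canConvertString_spec : Claim_equal_canConvertString := by
  intro s t k _
  unfold Spec_canConvertString canConvertString canConvertString_alt
  by_cases hlen : PySem.Str.len s ≠ PySem.Str.len t
  · rw [if_pos hlen, if_pos hlen]
  · rw [if_neg hlen, if_neg hlen]
    have hA := canConvertLoop_eq s.toList t.toList k PySem.Dict.empty []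
      (by intro d; simp [PySem.Dict.get?_empty])
      (by intro d hd; simp at hd)
    rw [hA]
    simp only [List.nil_append]
    have hbuild : buildShifts (s.toList.zip t.toList) = nds s.toList t.toList := by
      have hdef : buildShifts (s.toList.zip t.toList)
          = (s.toList.zip t.toList).foldl bstep [] := rfl
      rw [hdef, buildShifts_eq]
      simp [nds]
    set L := nds s.toList t.toList with hL
    set M := PySem.List.sorted L (fun x => x) false with hM
    have hperm : M.Perm L := PySem.List.sorted_perm L _ _
    have hpw : M.Pairwise (· ≤ ·) := by
      have := PySem.List.sorted_pairwise (xs := L) (key := fun x => x)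
      simpa using this
    rw [hbuild, ← hM]
    rw [scanShifts_eq k M none 0 hpw (by intro x _ p hp; simp at hp)]
    apply decide_eq_decide.mpr
    constructor
    · intro h v hv
      have := h v (hperm.mem_iff.mp hv)
      rw [hperm.count_eq]
      simpa using this
    · intro h v hv
      have := h v (hperm.mem_iff.mpr hv)
      rw [hperm.count_eq] at this
      simpa using this
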